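-- pv_equiv track=rewrite | github.com/AlanWSC/Graphic-Computation | Síntese de Imagem/12projecoes_tres_em_um.py | bresenham_linha_3d
-- ===== SOURCE A (Python) =====
-- def bresenham_linha_3d(x0, y0, z0, x1, y1, z1):
--     pontos = []
--     dx = abs(x1 - x0)
--     dy = abs(y1 - y0)
--     dz = abs(z1 - z0)
--     xs = 1 if x1 > x0 else -1
--     ys = 1 if y1 > y0 else -1
--     zs = 1 if z1 > z0 else -1
--
--     # Eixo de condução é o eixo X
--     if dx >= dy and dx >= dz:
--         p1 = 2 * dy - dx
--         p2 = 2 * dz - dx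
--         while x0 != x1:
--             x0 += xs
--             if p1 >= 0:
--                 y0 += ys
--                 p1 -= 2 * dx
--             if p2 >= 0:
--                 z0 += zs
--                 p2 -= 2 * dx
--             p1 += 2 * dy
--             p2 += 2 * dz
--             pontos.append((x0, y0, z0))
--     # Eixo de condução é o eixo Y
--     elif dy >= dx and dy >= dz:
--         p1 = 2 * dx - dy
--         p2 = 2 * dz - dy
--         while y0 != y1:
--             y0 += ys
--             if p1 >= 0:
--                 x0 += xs
--                 p1 -= 2 * dy
--             if p2 >= 0:
--                 z0 += zs
--                 p2 -= 2 * dy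
--             p1 += 2 * dx
--             p2 += 2 * dz
--             pontos.append((x0, y0, z0))
--     # Eixo de condução é o eixo Z
--     else:
--         p1 = 2 * dy - dz
--         p2 = 2 * dx - dz
--         while z0 != z1:
--             z0 += zs
--             if p1 >= 0:
--                 y0 += ys
--                 p1 -= 2 * dz
--             if p2 >= 0:
--                 x0 += xs
--                 p2 -= 2 * dz
--             p1 += 2 * dy
--             p2 += 2 * dx
--             pontos.append((x0, y0, z0))
--
--     return pontos
-- ===== SOURCE B (Python) =====
-- def bresenham_linha_3d(x0, y0, z0, x1, y1, z1):
--     # Closed form: along the driving axis (delta n), after i steps a minor axis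
--     # with delta d has moved by (2*i*d + n) // (2*n); no error accumulators needed.
--     dx = abs(x1 - x0)
--     dy = abs(y1 - y0)
--     dz = abs(z1 - z0)
--     xs = 1 if x1 > x0 else -1
--     ys = 1 if y1 > y0 else -1
--     zs = 1 if z1 > z0 else -1
--     if dx >= dy and dx >= dz:
--         m = 2 * dx
--         ta = 2 * dy
--         tb = 2 * dz
--         return [(x0 + i * xs,
--                  y0 + ys * ((i * ta + dx) // m),
--                  z0 + zs * ((i * tb + dx) // m))
--                 for i in range(1, dx + 1)]
--     elif dy >= dx and dy >= dz:
--         m = 2 * dy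
--         ta = 2 * dx
--         tb = 2 * dz
--         return [(x0 + xs * ((i * ta + dy) // m),
--                  y0 + i * ys,
--                  z0 + zs * ((i * tb + dy) // m))
--                 for i in range(1, dy + 1)]
--     else:
--         m = 2 * dz
--         ta = 2 * dx
--         tb = 2 * dy
--         return [(x0 + xs * ((i * ta + dz) // m),
--                  y0 + ys * ((i * tb + dz) // m),
--                  z0 + i * zs)
--                 for i in range(1, dz + 1)]
-- ===== Notes on version B (the rewrite author's own statement) =====
-- stated objective: alternative
-- what changed: Replaces A's incremental error-term (p1/p2) while-loops with a direct list comprehension that computes each minor coordinate in closed form as start + sign * ((2*i*minor_delta + n) // (2*n)) for i = 1..n along the driving axis.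
import Mathlib
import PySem

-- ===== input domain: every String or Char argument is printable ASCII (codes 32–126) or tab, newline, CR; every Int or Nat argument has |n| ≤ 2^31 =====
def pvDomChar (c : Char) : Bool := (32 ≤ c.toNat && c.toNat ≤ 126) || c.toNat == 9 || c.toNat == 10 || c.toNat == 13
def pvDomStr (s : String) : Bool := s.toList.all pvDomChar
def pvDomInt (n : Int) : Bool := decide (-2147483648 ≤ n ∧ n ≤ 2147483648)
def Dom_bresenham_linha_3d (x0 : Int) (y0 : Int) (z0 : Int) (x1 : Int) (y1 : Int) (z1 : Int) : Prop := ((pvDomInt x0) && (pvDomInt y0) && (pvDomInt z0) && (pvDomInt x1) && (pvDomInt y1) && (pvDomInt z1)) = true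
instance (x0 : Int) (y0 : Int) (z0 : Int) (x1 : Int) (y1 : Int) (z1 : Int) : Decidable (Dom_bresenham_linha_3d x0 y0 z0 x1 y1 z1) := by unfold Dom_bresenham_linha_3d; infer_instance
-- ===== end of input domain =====

-- B replaces A's incremental Bresenham error-term loops by a closed-form per-step
-- computation of each minor coordinate (objective: alternative decomposition, same cost).

-- ===== PORT A =====
-- One generic transcription of A's three structurally identical while-loops: c is the
-- driving coordinate, (a, p1, dA) and (b, p2, dB) the two minor axes with their error
-- terms, n the dominant delta; `out` only reassembles the appended tuple in (x, y, z)
-- order. Fuel = n is exactly how often the Python loop runs (c moves one unit toward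
-- tgt each iteration and stops exactly at tgt), so the fuel guard never fires early.
def pvLoop (out : Int → Int → Int → Int × Int × Int) (n dA dB sC sA sB tgt : Int) :
    Nat → Int → Int → Int → Int → Int → List (Int × Int × Int)
  | 0, _, _, _, _, _ => []
  | fuel+1, c, a, b, p1, p2 =>
    if c ≠ tgt then
      let c' := c + sC
      let a' := if p1 ≥ 0 then a + sA else a
      let p1' := (if p1 ≥ 0 then p1 - 2*n else p1) + 2*dA
      let b' := if p2 ≥ 0 then b + sB else b
      let p2' := (if p2 ≥ 0 then p2 - 2*n else p2) + 2*dB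
      out c' a' b' :: pvLoop out n dA dB sC sA sB tgt fuel c' a' b' p1' p2'
    else []

def bresenham_linha_3d (x0 : Int) (y0 : Int) (z0 : Int) (x1 : Int) (y1 : Int) (z1 : Int) : List (Int × Int × Int) :=
  if |x1 - x0| ≥ |y1 - y0| ∧ |x1 - x0| ≥ |z1 - z0| then
    pvLoop (fun x y z => (x, y, z)) (|x1 - x0|) (|y1 - y0|) (|z1 - z0|)
      (if x1 > x0 then 1 else -1) (if y1 > y0 then 1 else -1) (if z1 > z0 then 1 else -1)
      x1 (|x1 - x0|).toNat x0 y0 z0 (2 * |y1 - y0| - |x1 - x0|) (2 * |z1 - z0| - |x1 - x0|)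
  else if |y1 - y0| ≥ |x1 - x0| ∧ |y1 - y0| ≥ |z1 - z0| then
    pvLoop (fun y x z => (x, y, z)) (|y1 - y0|) (|x1 - x0|) (|z1 - z0|)
      (if y1 > y0 then 1 else -1) (if x1 > x0 then 1 else -1) (if z1 > z0 then 1 else -1)
      y1 (|y1 - y0|).toNat y0 x0 z0 (2 * |x1 - x0| - |y1 - y0|) (2 * |z1 - z0| - |y1 - y0|)
  else
    pvLoop (fun z y x => (x, y, z)) (|z1 - z0|) (|y1 - y0|) (|x1 - x0|)
      (if z1 > z0 then 1 else -1) (if y1 > y0 then 1 else -1) (if x1 > x0 then 1 else -1)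
      z1 (|z1 - z0|).toNat z0 y0 x0 (2 * |y1 - y0| - |z1 - z0|) (2 * |x1 - x0| - |z1 - z0|)

-- ===== PORT B =====
-- pvF d n i = (2*i*d + n) // (2*n) : the i-th minor-axis offset, in closed form.
def pvF (d n i : Int) : Int := PySem.Int.floordiv (2*i*d + n) (2*n)

def bresenham_linha_3d_alt (x0 : Int) (y0 : Int) (z0 : Int) (x1 : Int) (y1 : Int) (z1 : Int) : List (Int × Int × Int) :=
  if |x1 - x0| ≥ |y1 - y0| ∧ |x1 - x0| ≥ |z1 - z0| then
    (PySem.List.pyRange 1 (|x1 - x0| + 1) 1).map (fun i =>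
      (x0 + i * (if x1 > x0 then 1 else -1),
       y0 + (if y1 > y0 then 1 else -1) * pvF (|y1 - y0|) (|x1 - x0|) i,
       z0 + (if z1 > z0 then 1 else -1) * pvF (|z1 - z0|) (|x1 - x0|) i))
  else if |y1 - y0| ≥ |x1 - x0| ∧ |y1 - y0| ≥ |z1 - z0| then
    (PySem.List.pyRange 1 (|y1 - y0| + 1) 1).map (fun i =>
      (x0 + (if x1 > x0 then 1 else -1) * pvF (|x1 - x0|) (|y1 - y0|) i,
       y0 + i * (if y1 > y0 then 1 else -1),
       z0 + (if z1 > z0 then 1 else -1) * pvF (|z1 - z0|) (|y1 - y0|) i))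
  else
    (PySem.List.pyRange 1 (|z1 - z0| + 1) 1).map (fun i =>
      (x0 + (if x1 > x0 then 1 else -1) * pvF (|x1 - x0|) (|z1 - z0|) i,
       y0 + (if y1 > y0 then 1 else -1) * pvF (|y1 - y0|) (|z1 - z0|) i,
       z0 + i * (if z1 > z0 then 1 else -1)))

-- ===== PRECONDITION & SPEC =====
def Spec_bresenham_linha_3d (x0 : Int) (y0 : Int) (z0 : Int) (x1 : Int) (y1 : Int) (z1 : Int) (out : List (Int × Int × Int)) : Prop := out = bresenham_linha_3d_alt x0 y0 z0 x1 y1 z1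
instance (x0 : Int) (y0 : Int) (z0 : Int) (x1 : Int) (y1 : Int) (z1 : Int) (out : List (Int × Int × Int)) : Decidable (Spec_bresenham_linha_3d x0 y0 z0 x1 y1 z1 out) := by unfold Spec_bresenham_linha_3d; infer_instance

-- ===== CLAIM (what is proved, stated in full; the proofs are below) =====
def Claim_equal_bresenham_linha_3d : Prop := ∀ (x0 : Int) (y0 : Int) (z0 : Int) (x1 : Int) (y1 : Int) (z1 : Int), Dom_bresenham_linha_3d x0 y0 z0 x1 y1 z1 → Spec_bresenham_linha_3d x0 y0 z0 x1 y1 z1 (bresenham_linha_3d x0 y0 z0 x1 y1 z1)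

-- ===== LEMMAS AND PROOFS =====

lemma pvF_zero (d n : Int) (hn : 0 < n) : pvF d n 0 = 0 := by
  unfold pvF
  rw [PySem.Int.floordiv_eq_iff_of_pos (by omega)]
  omega

lemma pvF_bounds (d n i : Int) (hn : 0 < n) :
    pvF d n i * (2*n) ≤ 2*i*d + n ∧ 2*i*d + n < (pvF d n i + 1) * (2*n) := by
  exact (PySem.Int.floordiv_eq_iff_of_pos (by omega)).mp rfl

lemma pvF_succ_of_ge (d n i : Int) (hn : 0 < n) (_hd : 0 ≤ d) (hdn : d ≤ n)
    (h : 0 ≤ 2*(i+1)*d - n - 2*(pvF d n i)*n) : pvF d n (i+1) = pvF d n i + 1 := by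
  obtain ⟨h1, h2⟩ := pvF_bounds d n i hn
  unfold pvF at h h1 h2 ⊢
  rw [PySem.Int.floordiv_eq_iff_of_pos (by omega)]
  constructor <;> nlinarith

lemma pvF_succ_of_lt (d n i : Int) (hn : 0 < n) (hd : 0 ≤ d) (_hdn : d ≤ n)
    (h : 2*(i+1)*d - n - 2*(pvF d n i)*n < 0) : pvF d n (i+1) = pvF d n i := by
  obtain ⟨h1, h2⟩ := pvF_bounds d n i hn
  unfold pvF at h h1 h2 ⊢
  rw [PySem.Int.floordiv_eq_iff_of_pos (by omega)]
  constructor <;> nlinarith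

-- Loop invariant: after j of n steps the state is the closed form, and the loop
-- emits exactly the closed-form points j+1 .. n.
lemma pvLoop_eq (out : Int → Int → Int → Int × Int × Int) (n dA dB sC sA sB c0 a0 b0 : Int)
    (hn : 0 < n) (hA0 : 0 ≤ dA) (hAn : dA ≤ n) (hB0 : 0 ≤ dB) (hBn : dB ≤ n)
    (hsC : sC = 1 ∨ sC = -1) :
    ∀ (k j : Nat), (j : Int) + (k : Int) = n →
    pvLoop out n dA dB sC sA sB (c0 + n*sC) k (c0 + j*sC)
        (a0 + sA * pvF dA n j) (b0 + sB * pvF dB n j)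
        (2*((j:Int)+1)*dA - n - 2*(pvF dA n j)*n) (2*((j:Int)+1)*dB - n - 2*(pvF dB n j)*n)
      = (PySem.List.pyRange ((j:Int)+1) (n+1) 1).map
          (fun i => out (c0 + i*sC) (a0 + sA * pvF dA n i) (b0 + sB * pvF dB n i)) := by
  intro k
  induction k with
  | zero =>
    intro j hj
    rw [pvLoop, PySem.List.pyRange_one_eq_nil (by omega), List.map_nil]
  | succ k ih =>
    intro j hj
    have hne : c0 + (j : Int) * sC ≠ c0 + n * sC := by
      have hjn : (j : Int) < n := by omega
      rcases hsC with h | h <;> rw [h] <;> intro hc <;> omega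
    rw [pvLoop, if_pos hne]
    have hstepA : pvF dA n ((j:Int)+1)
        = pvF dA n j + (if 2*((j:Int)+1)*dA - n - 2*(pvF dA n j)*n ≥ 0 then 1 else 0) := by
      split_ifs with h
      · exact pvF_succ_of_ge dA n j hn hA0 hAn (by omega)
      · simpa using pvF_succ_of_lt dA n j hn hA0 hAn (by omega)
    have hstepB : pvF dB n ((j:Int)+1)
        = pvF dB n j + (if 2*((j:Int)+1)*dB - n - 2*(pvF dB n j)*n ≥ 0 then 1 else 0) := by
      split_ifs with h
      · exact pvF_succ_of_ge dB n j hn hB0 hBn (by omega)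
      · simpa using pvF_succ_of_lt dB n j hn hB0 hBn (by omega)
    have hc' : c0 + (j:Int) * sC + sC = c0 + ((j:Int) + 1) * sC := by ring
    have ha' : (if 2*((j:Int)+1)*dA - n - 2*(pvF dA n j)*n ≥ 0
          then a0 + sA * pvF dA n (j:Int) + sA else a0 + sA * pvF dA n (j:Int))
        = a0 + sA * pvF dA n ((j:Int)+1) := by
      rw [hstepA]; split_ifs <;> ring
    have hb' : (if 2*((j:Int)+1)*dB - n - 2*(pvF dB n j)*n ≥ 0
          then b0 + sB * pvF dB n (j:Int) + sB else b0 + sB * pvF dB n (j:Int))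
        = b0 + sB * pvF dB n ((j:Int)+1) := by
      rw [hstepB]; split_ifs <;> ring
    have hp1' : (if 2*((j:Int)+1)*dA - n - 2*(pvF dA n j)*n ≥ 0
          then 2*((j:Int)+1)*dA - n - 2*(pvF dA n j)*n - 2*n
          else 2*((j:Int)+1)*dA - n - 2*(pvF dA n j)*n) + 2*dA
        = 2*((j:Int)+1+1)*dA - n - 2*(pvF dA n ((j:Int)+1))*n := by
      rw [hstepA]; split_ifs <;> ring
    have hp2' : (if 2*((j:Int)+1)*dB - n - 2*(pvF dB n j)*n ≥ 0
          then 2*((j:Int)+1)*dB - n - 2*(pvF dB n j)*n - 2*n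
          else 2*((j:Int)+1)*dB - n - 2*(pvF dB n j)*n) + 2*dB
        = 2*((j:Int)+1+1)*dB - n - 2*(pvF dB n ((j:Int)+1))*n := by
      rw [hstepB]; split_ifs <;> ring
    have ihj := ih (j+1) (by push_cast; omega)
    push_cast at ihj
    rw [PySem.List.pyRange_one_cons (by omega)]
    simp only [List.map_cons, hc', ha', hb', hp1', hp2']
    rw [ihj]

-- Instantiation at j = 0 with the concrete start state of each branch.
lemma pvLoop_closed (out : Int → Int → Int → Int × Int × Int) (n dA dB sC sA sB c0 a0 b0 tgt : Int)
    (htgt : tgt = c0 + n*sC)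
    (hn : 0 < n) (hA0 : 0 ≤ dA) (hAn : dA ≤ n) (hB0 : 0 ≤ dB) (hBn : dB ≤ n)
    (hsC : sC = 1 ∨ sC = -1) :
    pvLoop out n dA dB sC sA sB tgt n.toNat c0 a0 b0 (2*dA - n) (2*dB - n)
      = (PySem.List.pyRange 1 (n+1) 1).map
          (fun i => out (c0 + i*sC) (a0 + sA * pvF dA n i) (b0 + sB * pvF dB n i)) := by
  subst htgt
  have h := pvLoop_eq out n dA dB sC sA sB c0 a0 b0 hn hA0 hAn hB0 hBn hsC n.toNat 0 (by omega)
  simpa [pvF_zero _ _ hn] using h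

lemma pv_sign (u v : Int) :
    (if v > u then (1:Int) else -1) = 1 ∨ (if v > u then (1:Int) else -1) = -1 := by
  split_ifs <;> simp

lemma pv_dir (u v : Int) (h : v ≠ u) :
    v = u + |v - u| * (if v > u then (1:Int) else -1) := by
  split_ifs with hgt
  · rw [abs_of_pos (by omega)]; ring
  · rw [abs_of_nonpos (by omega)]; ring

-- ===== VERDICT (by name: the statement is the Claim_ definition above) =====
theorem bresenham_linha_3d_spec : Claim_equal_bresenham_linha_3d := by
  unfold Claim_equal_bresenham_linha_3d
  intro x0 y0 z0 x1 y1 z1 _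
  unfold Spec_bresenham_linha_3d bresenham_linha_3d bresenham_linha_3d_alt
  have hx0 : (0:Int) ≤ |x1 - x0| := abs_nonneg _
  have hy0 : (0:Int) ≤ |y1 - y0| := abs_nonneg _
  have hz0 : (0:Int) ≤ |z1 - z0| := abs_nonneg _
  have hxdir := pv_dir x0 x1
  have hydir := pv_dir y0 y1
  have hzdir := pv_dir z0 z1
  have hxsgn := pv_sign x0 x1
  have hysgn := pv_sign y0 y1
  have hzsgn := pv_sign z0 z1
  generalize hxs : (if x1 > x0 then (1:Int) else -1) = xs at *
  generalize hys : (if y1 > y0 then (1:Int) else -1) = ys at *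
  generalize hzs : (if z1 > z0 then (1:Int) else -1) = zs at *
  split_ifs with h1 h2
  · -- X drives
    rcases eq_or_ne x1 x0 with hx | hx
    · have hdx : |x1 - x0| = 0 := by rw [hx]; simp
      rw [hdx, show ((0:Int).toNat) = 0 from rfl, pvLoop,
        PySem.List.pyRange_one_eq_nil (by omega), List.map_nil]
    · have hn : 0 < |x1 - x0| := abs_pos.mpr (sub_ne_zero.mpr hx)
      exact pvLoop_closed _ _ _ _ _ _ _ _ _ _ _ (hxdir hx) hn hy0 h1.1 hz0 h1.2 hxsgn
  · -- Y drives
    have hn : 0 < |y1 - y0| := by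
      rcases not_and_or.mp h1 with h | h <;> omega
    have hy : y1 ≠ y0 := by intro h; rw [h] at hn; simp at hn
    exact pvLoop_closed _ _ _ _ _ _ _ _ _ _ _ (hydir hy) hn hx0 h2.1 hz0 h2.2 hysgn
  · -- Z drives
    have hzx : |x1 - x0| ≤ |z1 - z0| := by
      rcases not_and_or.mp h1 with h | h <;> rcases not_and_or.mp h2 with h' | h' <;> omega
    have hzy : |y1 - y0| ≤ |z1 - z0| := by
      rcases not_and_or.mp h1 with _h | _h <;> omega
    have hn : 0 < |z1 - z0| := by
      rcases not_and_or.mp h1 with h | h <;> omega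
    have hz : z1 ≠ z0 := by intro h; rw [h] at hn; simp at hn
    exact pvLoop_closed _ _ _ _ _ _ _ _ _ _ _ (hzdir hz) hn hy0 hzy hx0 hzx hzsgn
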